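-- pv_equiv track=rewrite | github.com/OutWork-HCM/RAG | populate_database_vi.py | split_into_pages
-- ===== SOURCE A (Python) =====
-- def split_into_pages(text: str, total_pages: int) -> list:
--     """
--     Split the document content into pages based on the desired number of pages.
--     When a fixed split position (by length) does not end with a period (.),
--     the function will look for the next period to break the page.
--     If no period is found in the remaining content, the fixed split position will be used.
--     """
--     if total_pages <= 0:
--         return [text]
--     text_length = len(text)
--     approx_page_length = text_length // total_pages
--     pages = []
--
--     start = 0
--     for i in range(total_pages):
--         # If the last page, take all context
--         if i == total_pages - 1:
--             pages.append(text[start:])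
--             break
--
--         # Indentify location of break point
--         end = start + approx_page_length
--         if end >= text_length:
--             pages.append(text[start:])
--             break
--
--         # If there is no period (.) at the cut position, search for the next period.
--         while end < text_length and text[end] not in ".!?":
--             end += 1
--
--         # Found the period
--         if end < text_length:
--             end += 1
--
--         pages.append(text[start:end])
--         start = end
--     return pages
-- ===== SOURCE B (Python) =====
-- def split_into_pages(text: str, total_pages: int) -> list:
--     """Two-stage alternative: first compute the list of cut positions (each the
--     position just after the first sentence terminator at or past the approximate
--     page boundary), then slice the text between consecutive cuts."""
--     if total_pages <= 0:
--         return [text]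
--     n = len(text)
--     approx = n // total_pages
--     # cut candidates: position just after each '.', '!' or '?'
--     stops = [i + 1 for i, ch in enumerate(text) if ch in ".!?"]
--     cuts = [0]
--     for _ in range(total_pages - 1):
--         end = cuts[-1] + approx
--         if end >= n:
--             break
--         cuts.append(next((t for t in stops if t > end), n))
--     return [text[a:b] for a, b in zip(cuts, cuts[1:])] + [text[cuts[-1]:]]
-- ===== Notes on version B (the rewrite author's own statement) =====
-- stated objective: alternative
-- what changed: B is two-staged: it first builds the list of all cut positions (one pass over the text for terminator positions, then a short loop computing the page boundaries), and only then produces the pages by slicing between consecutive cut positions, instead of A's single loop that scans characters forward and appends pages as it goes.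
import Mathlib
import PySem

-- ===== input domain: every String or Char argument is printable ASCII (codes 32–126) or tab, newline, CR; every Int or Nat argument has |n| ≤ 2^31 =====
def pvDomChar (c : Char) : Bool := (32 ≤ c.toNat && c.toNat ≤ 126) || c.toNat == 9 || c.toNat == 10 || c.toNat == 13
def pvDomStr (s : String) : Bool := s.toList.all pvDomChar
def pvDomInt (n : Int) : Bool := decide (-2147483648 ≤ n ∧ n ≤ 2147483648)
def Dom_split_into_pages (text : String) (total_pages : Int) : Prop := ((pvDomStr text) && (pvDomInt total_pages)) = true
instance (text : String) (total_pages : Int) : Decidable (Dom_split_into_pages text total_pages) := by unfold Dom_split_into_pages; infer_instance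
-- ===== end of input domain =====

-- B replaces A's page-by-page forward character scan by a two-stage computation:
-- first the full list of cut positions, then the pages as slices between
-- consecutive cuts (objective: alternative decomposition, same asymptotic cost).

-- ===== PORT A =====

-- `text[end] in ".!?"`
def pvIsTerm (c : Char) : Bool := c == '.' || c == '!' || c == '?'

-- the inner `while end < text_length and text[end] not in ".!?": end += 1`
def pvScanA (cs : List Char) (e : Nat) : Nat :=
  if h : e < cs.length then
    if pvIsTerm cs[e] then e else pvScanA cs (e + 1)
  else e
termination_by cs.length - e
decreasing_by omega

-- the `for i in range(total_pages)` loop; fuel = number of remaining iterations,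
-- so `fuel = 1` is exactly `i == total_pages - 1`.  All indices stay ≥ 0 in the
-- Python, so Nat indices are exact; text[start:end] with 0 ≤ start ≤ end ≤ len
-- is (drop start).take (end - start), and text[start:] is drop start.
def pvLoopA (cs : List Char) (approx : Nat) : Nat → Nat → List String
  | 0, _ => []
  | fuel + 1, start =>
    if fuel = 0 then [String.ofList (cs.drop start)]
    else
      let e0 := start + approx
      if cs.length ≤ e0 then [String.ofList (cs.drop start)]
      else
        let e1 := pvScanA cs e0
        let e2 := if e1 < cs.length then e1 + 1 else e1
        String.ofList ((cs.drop start).take (e2 - start)) :: pvLoopA cs approx fuel e2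

def split_into_pages (text : String) (total_pages : Int) : List String :=
  if total_pages ≤ 0 then [text]
  else
    let cs := text.toList
    -- text_length // total_pages: both nonnegative here, so Nat division is exact
    let approx := cs.length / total_pages.toNat
    pvLoopA cs approx total_pages.toNat 0

-- ===== PORT B =====

-- `stops = [i + 1 for i, ch in enumerate(text) if ch in ".!?"]`
def pvStops : List Char → Nat → List Nat
  | [], _ => []
  | c :: cs, i => if pvIsTerm c then (i + 1) :: pvStops cs (i + 1) else pvStops cs (i + 1)

-- `next((t for t in stops if t > end), n)`
def pvNextCut : List Nat → Nat → Nat → Nat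
  | [], _, n => n
  | t :: ts, e, n => if e < t then t else pvNextCut ts e n

-- the cut-collecting loop `for _ in range(total_pages - 1)`; returns the cuts
-- appended after the initial 0, i.e. Python's `cuts` is `0 :: pvCutsB … 0`
def pvCutsB (n : Nat) (approx : Nat) (stops : List Nat) : Nat → Nat → List Nat
  | 0, _ => []
  | fuel + 1, last =>
    let e := last + approx
    if n ≤ e then []
    else
      let c := pvNextCut stops e n
      c :: pvCutsB n approx stops fuel c

-- `[text[a:b] for a, b in zip(cuts, cuts[1:])] + [text[cuts[-1]:]]`
def pvPagesB (cs : List Char) (cuts : List Nat) : List String :=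
  ((cuts.zip cuts.tail).map
      (fun p => String.ofList ((cs.drop p.1).take (p.2 - p.1))))
    ++ [String.ofList (cs.drop (cuts.getLastD 0))]

def split_into_pages_alt (text : String) (total_pages : Int) : List String :=
  if total_pages ≤ 0 then [text]
  else
    let cs := text.toList
    let approx := cs.length / total_pages.toNat
    pvPagesB cs (0 :: pvCutsB cs.length approx (pvStops cs 0) (total_pages.toNat - 1) 0)

-- ===== PRECONDITION & SPEC =====
def Spec_split_into_pages (text : String) (total_pages : Int) (out : List String) : Prop := out = split_into_pages_alt text total_pages
instance (text : String) (total_pages : Int) (out : List String) : Decidable (Spec_split_into_pages text total_pages out) := by unfold Spec_split_into_pages; infer_instance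

-- ===== CLAIM (what is proved, stated in full; the proofs are below) =====
def Claim_equal_split_into_pages : Prop := ∀ (text : String) (total_pages : Int), Dom_split_into_pages text total_pages → Spec_split_into_pages text total_pages (split_into_pages text total_pages)

-- ===== LEMMAS AND PROOFS =====

-- every element of pvStops cs off is (terminator index) + 1, shifted by off
theorem pvStops_mem {cs : List Char} {off t : Nat} (h : t ∈ pvStops cs off) :
    off < t ∧ ∃ h' : t - 1 - off < cs.length, pvIsTerm (cs[t - 1 - off]'h') := by
  induction cs generalizing off with
  | nil => simp [pvStops] at h
  | cons c cs ih =>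
    by_cases hc : pvIsTerm c
    · rw [pvStops, if_pos hc] at h
      rcases List.mem_cons.mp h with h | h
      · subst h
        exact ⟨by omega, by simp [hc]⟩
      · obtain ⟨h1, h2, h3⟩ := ih h
        have hlt : t - 1 - off < (c :: cs).length := by simp; omega
        refine ⟨by omega, hlt, ?_⟩
        have heq : t - 1 - off = (t - 1 - (off + 1)) + 1 := by omega
        simpa [heq, List.getElem_cons_succ] using h3
    · rw [pvStops, if_neg hc] at h
      obtain ⟨h1, h2, h3⟩ := ih h
      have hlt : t - 1 - off < (c :: cs).length := by simp; omega
      refine ⟨by omega, hlt, ?_⟩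
      have heq : t - 1 - off = (t - 1 - (off + 1)) + 1 := by omega
      simpa [heq, List.getElem_cons_succ] using h3

-- every in-range terminator index k contributes off + k + 1 to pvStops
theorem pvStops_complete {cs : List Char} {off k : Nat} (h : k < cs.length)
    (ht : pvIsTerm (cs[k]'h)) : off + k + 1 ∈ pvStops cs off := by
  induction cs generalizing off k with
  | nil => simp at h
  | cons c cs ih =>
    cases k with
    | zero =>
      have hc0 : pvIsTerm c := by simpa using ht
      rw [pvStops, if_pos hc0]
      simp
    | succ k =>
      have hk : k < cs.length := by simpa using h
      have ht' : pvIsTerm (cs[k]'hk) := by simpa using ht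
      have hmem := ih (off := off + 1) hk ht'
      have harith : off + (k + 1) + 1 = (off + 1) + k + 1 := by omega
      rw [pvStops]
      by_cases hc : pvIsTerm c
      · rw [if_pos hc]
        exact List.mem_cons_of_mem _ (harith ▸ hmem)
      · rw [if_neg hc]
        exact harith ▸ hmem

-- pvStops is strictly increasing
theorem pvStops_sorted (cs : List Char) (off : Nat) : (pvStops cs off).Pairwise (· < ·) := by
  induction cs generalizing off with
  | nil => simp [pvStops]
  | cons c cs ih =>
    by_cases hc : pvIsTerm c <;> simp [pvStops, hc]
    · exact ⟨fun b hb => by have := (pvStops_mem hb).1; omega, ih _⟩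
    · exact ih _

-- pvScanA when no terminator at or after e exists
theorem pvScanA_none {cs : List Char} {e : Nat} (hle : e ≤ cs.length)
    (hno : ∀ i (h : i < cs.length), e ≤ i → ¬ pvIsTerm (cs[i]'h)) :
    pvScanA cs e = cs.length := by
  by_cases h : e < cs.length
  · rw [pvScanA]
    simp only [h, dif_pos]
    rw [if_neg (hno e h (Nat.le_refl _)), pvScanA_none (by omega)
      (fun i hi hle' => hno i hi (by omega))]
  · rw [pvScanA]
    simp only [h, dif_neg, not_false_iff]
    omega
termination_by cs.length - e
decreasing_by omega

-- pvScanA when t is the first terminator at or after e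
theorem pvScanA_found {cs : List Char} {e t : Nat} (het : e ≤ t) (ht : t < cs.length)
    (htt : pvIsTerm (cs[t]'ht))
    (hmin : ∀ i (h : i < cs.length), e ≤ i → i < t → ¬ pvIsTerm (cs[i]'h)) :
    pvScanA cs e = t := by
  rcases Nat.eq_or_lt_of_le het with heq | hlt
  · subst heq
    rw [pvScanA]
    simp [ht, htt]
  · rw [pvScanA]
    have he : e < cs.length := by omega
    simp only [he, dif_pos]
    rw [if_neg (hmin e he (Nat.le_refl _) hlt),
      pvScanA_found (by omega) ht htt (fun i hi h1 h2 => hmin i hi (by omega) h2)]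
termination_by t - e
decreasing_by omega

-- pvNextCut returns the minimal element > e of a strictly increasing list
theorem pvNextCut_found {ts : List Nat} {e t n : Nat} (hs : ts.Pairwise (· < ·))
    (hmem : t ∈ ts) (het : e < t) (hmin : ∀ u ∈ ts, e < u → t ≤ u) :
    pvNextCut ts e n = t := by
  induction ts with
  | nil => simp at hmem
  | cons a ts ih =>
    rw [pvNextCut]
    by_cases ha : e < a
    · rw [if_pos ha]
      have h1 := hmin a (List.mem_cons_self) ha
      rcases List.mem_cons.mp hmem with h | h
      · omega
      · have : a < t := (List.pairwise_cons.mp hs).1 t h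
        omega
    · rw [if_neg ha]
      have ht : t ∈ ts := by
        rcases List.mem_cons.mp hmem with h | h
        · omega
        · exact h
      exact ih (List.pairwise_cons.mp hs).2 ht
        (fun u hu => hmin u (List.mem_cons_of_mem _ hu))

-- pvNextCut falls through to the default when nothing exceeds e
theorem pvNextCut_none {ts : List Nat} {e n : Nat} (hno : ∀ u ∈ ts, ¬ e < u) :
    pvNextCut ts e n = n := by
  induction ts with
  | nil => rfl
  | cons a ts ih =>
    rw [pvNextCut, if_neg (hno a List.mem_cons_self)]
    exact ih (fun u hu => hno u (List.mem_cons_of_mem _ hu))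

-- KEY: A's scan-then-bump end equals B's looked-up cut position
theorem pvEnd_eq (cs : List Char) (e : Nat) (he : e < cs.length) :
    (if pvScanA cs e < cs.length then pvScanA cs e + 1 else pvScanA cs e)
      = pvNextCut (pvStops cs 0) e cs.length := by
  by_cases hex : ∃ k, k < cs.length ∧ e ≤ k ∧ pvIsTerm (cs.getD k ' ')
  · have ht := Nat.find_spec hex
    set t := Nat.find hex with htdef
    obtain ⟨htn, het, htterm⟩ := ht
    have htterm' : pvIsTerm (cs[t]'htn) := by
      rwa [List.getD_eq_getElem cs ' ' htn] at htterm
    have hmin' : ∀ i (h : i < cs.length), e ≤ i → i < t → ¬ pvIsTerm (cs[i]'h) := by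
      intro i hi hei hit hterm
      exact Nat.find_min hex hit ⟨hi, hei, by rwa [List.getD_eq_getElem cs ' ' hi]⟩
    have hscan : pvScanA cs e = t := pvScanA_found het htn htterm' hmin'
    rw [hscan, if_pos htn]
    symm
    apply pvNextCut_found (pvStops_sorted cs 0) (by simpa using pvStops_complete (off := 0) htn htterm')
      (by omega)
    intro u hu heu
    obtain ⟨hpos, hlt, hterm⟩ := pvStops_mem hu
    have h1 : u - 1 < cs.length := by omega
    have hterm1 : pvIsTerm (cs[u - 1]'h1) := by
      have : u - 1 - 0 = u - 1 := by omega
      simpa [this] using hterm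
    have : t ≤ u - 1 := by
      by_contra hc
      exact hmin' (u - 1) h1 (by omega) (by omega) hterm1
    omega
  · have hno : ∀ i (h : i < cs.length), e ≤ i → ¬ pvIsTerm (cs[i]'h) := by
      intro i hi hei hterm
      exact hex ⟨i, hi, hei, by rwa [List.getD_eq_getElem cs ' ' hi]⟩
    rw [pvScanA_none (Nat.le_of_lt he) hno, if_neg (Nat.lt_irrefl _)]
    symm
    apply pvNextCut_none
    intro u hu heu
    obtain ⟨hpos, hlt, hterm⟩ := pvStops_mem hu
    have h1 : u - 1 < cs.length := by omega
    exact hno (u - 1) h1 (by omega) (by simpa using hterm)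

-- B's page builder on a cons-cons list peels one slice
theorem pvPagesB_cons (cs : List Char) (a b : Nat) (rest : List Nat) :
    pvPagesB cs (a :: b :: rest)
      = String.ofList ((cs.drop a).take (b - a)) :: pvPagesB cs (b :: rest) := by
  simp [pvPagesB]

theorem pvPagesB_single (cs : List Char) (a : Nat) :
    pvPagesB cs [a] = [String.ofList (cs.drop a)] := by
  simp [pvPagesB]

-- the loops agree: A's page loop with fuel+1 iterations equals B's pages over
-- the cut list computed with fuel iterations
theorem pvLoop_eq (cs : List Char) (approx : Nat) :
    ∀ (fuel start : Nat),
      pvLoopA cs approx (fuel + 1) start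
        = pvPagesB cs (start :: pvCutsB cs.length approx (pvStops cs 0) fuel start) := by
  intro fuel
  induction fuel with
  | zero =>
    intro start
    rw [pvCutsB, pvPagesB_single]
    simp [pvLoopA]
  | succ fuel ih =>
    intro start
    rw [pvLoopA, pvCutsB]
    simp only [Nat.succ_ne_zero, if_false]
    by_cases hend : cs.length ≤ start + approx
    · rw [if_pos hend, if_pos hend, pvPagesB_single]
    · rw [if_neg hend, if_neg hend]
      have he : start + approx < cs.length := by omega
      rw [pvPagesB_cons, ← ih, pvEnd_eq cs (start + approx) he]

-- ===== VERDICT (by name: the statement is the Claim_ definition above) =====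
theorem split_into_pages_spec : Claim_equal_split_into_pages := by
  intro text total_pages _
  unfold Spec_split_into_pages split_into_pages split_into_pages_alt
  by_cases h : total_pages ≤ 0
  · simp [h]
  · simp only [h, if_false]
    have htp : total_pages.toNat = (total_pages.toNat - 1) + 1 := by omega
    rw [htp]
    exact pvLoop_eq _ _ _ 0
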